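-- pv_equiv track=rewrite | github.com/AlectoSaeglopur/SCIENCE | 2-TLC/GNUR/VM_Ubuntu16/Libraries/gr-zVKN/python/psk_mapper_p_mm.py | Byte2BitConv
-- ===== SOURCE A (Python) =====
-- def Byte2BitConv( InBytes ) :
--     InLen = len(InBytes)
--     OutLen = (InLen<<3)
--     OutBits = [0]*OutLen
--     for j in range(OutLen) :
--         ByteIdx = (j>>3)
--         BitIdx = 7-(j%8)
--         if (InBytes[ByteIdx] >>BitIdx)%2 :
--             OutBits[j] = 1
--     return OutBits
-- ===== SOURCE B (Python) =====
-- def Byte2BitConv(InBytes):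
--     # Format each byte's low 8 bits as an 8-char binary string and flatten its digits.
--     return [int(c) for byte in InBytes for c in format(byte % 256, '08b')]
-- ===== Notes on version B (the rewrite author's own statement) =====
-- stated objective: idiomatic
-- what changed: Replaces the flat index loop that recomputes ByteIdx/BitIdx and scatters 1s into a preallocated zero list by a nested comprehension that binary-formats each byte ('08b') and flattens the digit characters.
import Mathlib
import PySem

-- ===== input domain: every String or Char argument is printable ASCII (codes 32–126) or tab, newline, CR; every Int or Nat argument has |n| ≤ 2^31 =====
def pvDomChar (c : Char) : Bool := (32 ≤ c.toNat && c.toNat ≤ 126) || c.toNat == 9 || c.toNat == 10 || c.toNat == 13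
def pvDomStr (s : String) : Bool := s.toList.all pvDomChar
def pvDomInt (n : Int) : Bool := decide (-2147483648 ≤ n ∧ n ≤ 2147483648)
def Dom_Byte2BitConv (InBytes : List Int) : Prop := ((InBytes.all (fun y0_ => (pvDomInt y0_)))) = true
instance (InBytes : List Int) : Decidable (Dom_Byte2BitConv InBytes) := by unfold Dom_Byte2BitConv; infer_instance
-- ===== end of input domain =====

-- B replaces A's flat index loop (scatter of 1s into a preallocated zero list) by an
-- idiomatic nested comprehension: binary-format each byte ('08b') and flatten the digits.


-- ===== PORT A =====
def Byte2BitConv (InBytes : List Int) : List Int :=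
  let InLen : Int := InBytes.length
  let OutLen : Int := InLen <<< (3:Nat)
  let OutBits : List Int := List.replicate OutLen.toNat 0   -- [0]*OutLen
  (PySem.List.pyRange 0 OutLen 1).foldl (fun (OutBits : List Int) (j : Int) =>
    let ByteIdx : Int := j >>> (3:Nat)
    let BitIdx : Int := 7 - PySem.Int.mod j 8
    -- InBytes[ByteIdx]: index is always in range (0 ≤ j < 8*len ⇒ 0 ≤ j>>3 < len), so the
    -- default of pyGetD is never used; exact.  Python '>>' on Int is Lean '>>>' (PySem);
    -- BitIdx ∈ [0,7] so '.toNat' is exact.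
    if PySem.Int.mod (PySem.List.pyGetD InBytes ByteIdx 0 >>> BitIdx.toNat) 2 ≠ 0 then
      -- OutBits[j] = 1: j is always in range, so List.set is exact; 0 ≤ j makes .toNat exact
      OutBits.set j.toNat 1
    else OutBits) OutBits

-- ===== PORT B =====
-- format(n, '08b') for a Nat n: binary digits (Nat.toDigits 2, the library conversion
-- format calls for in Source B) left-padded with '0' to width 8; exact for n < 256.
def pyFormat08b (n : Nat) : List Char :=
  let ds := Nat.toDigits 2 n
  List.replicate (8 - ds.length) '0' ++ ds

def Byte2BitConv_alt (InBytes : List Int) : List Int :=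
  InBytes.flatMap (fun byte =>
    -- byte % 256 → PySem.Int.mod (nonnegative since 256 > 0), so .toNat is exact;
    -- int(c) on a binary digit character is its code minus 48: exact.
    (pyFormat08b (PySem.Int.mod byte 256).toNat).map (fun c => ((c.toNat : Int) - 48)))

-- ===== PRECONDITION & SPEC =====
def Spec_Byte2BitConv (InBytes : List Int) (out : List Int) : Prop := out = Byte2BitConv_alt InBytes
instance (InBytes : List Int) (out : List Int) : Decidable (Spec_Byte2BitConv InBytes out) := by unfold Spec_Byte2BitConv; infer_instance

-- ===== CLAIM (what is proved, stated in full; the proofs are below) =====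
def Claim_equal_Byte2BitConv : Prop := ∀ (InBytes : List Int), Dom_Byte2BitConv InBytes → Spec_Byte2BitConv InBytes (Byte2BitConv InBytes)

-- ===== LEMMAS AND PROOFS =====

-- A's per-bit value, as a function of the byte and the bit position i (0 = MSB).
def pvBitF (m : Int) (i : Nat) : Int :=
  if PySem.Int.mod (m >>> (7 - i)) 2 ≠ 0 then 1 else 0

-- Scatter aux: if every index hit is inside the left part, the tail rides along.
lemma pv_scatter_aux (p : Nat → Prop) [DecidablePred p] :
    ∀ (ks : List Nat) (l t : List Int), (∀ k ∈ ks, k < l.length) →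
    ks.foldl (fun acc k => if p k then acc.set k 1 else acc) (l ++ t) =
    ks.foldl (fun acc k => if p k then acc.set k 1 else acc) l ++ t := by
  intro ks
  induction ks with
  | nil => intro l t _; rfl
  | cons k ks ih =>
    intro l t h
    simp only [List.foldl_cons]
    by_cases hp : p k
    · rw [if_pos hp, if_pos hp, List.set_append, if_pos (h k (by simp))]
      exact ih _ t (by intro k' hk'; simpa using h k' (by simp [hk']))
    · rw [if_neg hp, if_neg hp]
      exact ih _ t (by intro k' hk'; exact h k' (by simp [hk']))

-- A's loop: scattering 1s over a zero list of length N equals mapping the test over range N.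
lemma pv_scatter (p : Nat → Prop) [DecidablePred p] :
    ∀ N : Nat, (List.range N).foldl (fun acc k => if p k then acc.set k 1 else acc)
        (List.replicate N (0 : Int)) =
      (List.range N).map (fun k => if p k then (1 : Int) else 0) := by
  intro N
  induction N with
  | zero => rfl
  | succ N ih =>
    rw [List.range_succ, List.replicate_succ' ,List.foldl_append,
        pv_scatter_aux p _ _ _ (by intro k hk; simpa using List.mem_range.mp hk), ih,
        List.map_append]
    simp only [List.foldl_cons, List.foldl_nil, List.map_cons, List.map_nil]
    by_cases hp : p N
    · rw [if_pos hp, if_pos hp, List.set_append,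
          if_neg (by simp)]
      simp
    · rw [if_neg hp, if_neg hp]

-- Splitting range (8·|xs|) into blocks of 8: index arithmetic becomes per-element iteration.
lemma pv_blocks {α : Type} (f : α → Nat → Int) (d : α) :
    ∀ xs : List α,
      (List.range (8 * xs.length)).map (fun k => f (xs.getD (k / 8) d) (k % 8)) =
      xs.flatMap (fun x => (List.range 8).map (f x)) := by
  intro xs
  induction xs using List.reverseRecOn with
  | nil => rfl
  | append_singleton t x ih =>
    rw [List.length_append, List.length_singleton, Nat.mul_add, Nat.mul_one,
        List.range_add, List.map_append, List.flatMap_append]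
    congr 1
    · rw [← ih]
      apply List.map_congr_left
      intro k hk
      have hk8 : k < 8 * t.length := List.mem_range.mp hk
      have : k / 8 < t.length := by omega
      rw [List.getD_append _ _ _ _ this]
    · simp only [List.flatMap_cons, List.flatMap_nil, List.append_nil, List.map_map]
      apply List.map_congr_left
      intro i hi
      have hi8 : i < 8 := List.mem_range.mp hi
      have hdiv : (8 * t.length + i) / 8 = t.length := by omega
      have hmod : (8 * t.length + i) % 8 = i := by omega
      simp only [Function.comp_apply, hdiv, hmod]
      congr 1
      simp [List.getD_eq_getElem?_getD]

-- The low-3 bits test only depends on the byte's residue mod 256.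
lemma pv_bit_mod (m : Int) (b : Nat) (hb : b < 8) :
    PySem.Int.mod (m >>> b) 2 = PySem.Int.mod (PySem.Int.mod m 256 >>> b) 2 := by
  rw [PySem.Int.mod_eq_emod_of_pos (by norm_num : (0:Int) < 256)]
  rw [PySem.Int.mod_eq_emod_of_pos (by norm_num : (0:Int) < 2),
      PySem.Int.mod_eq_emod_of_pos (by norm_num : (0:Int) < 2)]
  interval_cases b <;> simp [Int.shiftRight_eq_div_pow] <;> omega

-- The 256 byte values: the padded binary string's digits are exactly A's bit tests.
set_option maxRecDepth 100000 in
lemma pv_byte_digits : ∀ n : Nat, n < 256 →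
    (pyFormat08b n).map (fun c => ((c.toNat : Int) - 48)) =
    (List.range 8).map (pvBitF (n : Int)) := by
  decide

-- Per byte: B's digit block equals A's bit block, for every Int byte.
lemma pv_byte (m : Int) :
    (pyFormat08b (PySem.Int.mod m 256).toNat).map (fun c => ((c.toNat : Int) - 48)) =
    (List.range 8).map (pvBitF m) := by
  have h0 : 0 ≤ PySem.Int.mod m 256 := PySem.Int.mod_nonneg m (by norm_num)
  have h1 : PySem.Int.mod m 256 < 256 := PySem.Int.mod_lt m (by norm_num)
  have hn : (PySem.Int.mod m 256).toNat < 256 := by omega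
  rw [pv_byte_digits _ hn]
  apply List.map_congr_left
  intro i hi
  have hcast : (((PySem.Int.mod m 256).toNat : Int)) = PySem.Int.mod m 256 :=
    Int.toNat_of_nonneg h0
  simp only [pvBitF, hcast]
  rw [← pv_bit_mod m (7 - i) (by omega)]

-- ===== VERDICT (by name: the statement is the Claim_ definition above) =====
theorem Byte2BitConv_spec : Claim_equal_Byte2BitConv := by
  intro xs _
  unfold Spec_Byte2BitConv Byte2BitConv Byte2BitConv_alt
  simp only []
  have h8 : ((xs.length : Int)) <<< (3:Nat) = ((8 * xs.length : Nat) : Int) := by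
    rw [Int.shiftLeft_eq]; push_cast; ring
  rw [h8, PySem.List.pyRange_zero_nat, List.foldl_map]
  have htn : (((8 * xs.length : Nat) : Int)).toNat = 8 * xs.length := Int.toNat_natCast _
  rw [htn]
  simp only [Int.toNat_natCast]
  rw [pv_scatter (fun k => PySem.Int.mod
        (PySem.List.pyGetD xs ((k : Int) >>> (3:Nat)) 0 >>> (7 - PySem.Int.mod (k : Int) 8).toNat) 2 ≠ 0)]
  have hcongr : (List.range (8 * xs.length)).map
      (fun (k : Nat) => if PySem.Int.mod (PySem.List.pyGetD xs (((k : Int)) >>> (3:Nat)) 0 >>>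
                    (7 - PySem.Int.mod ((k : Int)) 8).toNat) 2 ≠ 0 then (1:Int) else 0) =
      (List.range (8 * xs.length)).map (fun (k : Nat) => pvBitF (xs.getD (k / 8) 0) (k % 8)) := by
    apply List.map_congr_left
    intro k hk
    have hshift : ((k : Int)) >>> (3:Nat) = ((k / 8 : Nat) : Int) := by
      rw [Int.shiftRight_eq_div_pow]; omega
    have hm : PySem.Int.mod (k : Int) 8 = ((k % 8 : Nat) : Int) := by
      simp
    have ht : ((7 : Int) - ((k % 8 : Nat) : Int)).toNat = 7 - k % 8 := by omega
    rw [hshift, PySem.List.pyGetD_natCast, hm, ht, pvBitF]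
  rw [hcongr, pv_blocks pvBitF (0 : Int) xs]
  exact (List.flatMap_congr (fun m _ => pv_byte m)).symm
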